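-- pv_equiv track=rewrite | github.com/jordanzn/tubesStrategiAlgoritma | RT GREEDY.py | find_optimal_assignment
-- ===== SOURCE A (Python) =====
-- def find_optimal_assignment(data):
--     num_workers = len(data)
--     num_jobs = len(data[0])
--
--     # Inisialisasi penugasan awal dengan indeks jobs berurutan
--     assignment = list(range(num_jobs))
--     min_cost = calculate_total_cost(assignment, data)
--
--     # Cari penugasan yang memiliki biaya minimum
--     for i in range(num_jobs):
--         for j in range(i+1, num_jobs):
--             # Swap pekerjaan pada posisi i dan j
--             assignment[i], assignment[j] = assignment[j], assignment[i]
--             cost = calculate_total_cost(assignment, data)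
--             if cost < min_cost:
--                 min_cost = cost
--             else:
--                 # Jika biaya lebih besar atau sama, kembalikan ke penugasan semula
--                 assignment[i], assignment[j] = assignment[j], assignment[i]
--
--     return assignment, min_cost
--
-- def calculate_total_cost(assignment, data):
--     total_cost = 0
--     for i in range(len(assignment)):
--         total_cost += data[i][assignment[i]]
--     return total_cost
-- ===== SOURCE B (Python) =====
-- def find_optimal_assignment(data):
--     n = len(data[0])
--     assignment = list(range(n))
--     cost = sum(data[i][assignment[i]] for i in range(n))
--     for i in range(n):
--         for j in range(i + 1, n):
--             ai, aj = assignment[i], assignment[j]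
--             delta = data[i][aj] + data[j][ai] - data[i][ai] - data[j][aj]
--             if delta < 0:
--                 assignment[i], assignment[j] = aj, ai
--                 cost += delta
--     return assignment, cost
-- ===== Notes on version B (the rewrite author's own statement) =====
-- stated objective: faster
-- what changed: Each candidate swap is evaluated by an O(1) incremental cost delta (four matrix entries) instead of A's swap / full O(n) cost recomputation / swap-back, removing the inner recomputation pass.
-- outside the precondition, e.g. on find_optimal_assignment([[2, 5, 0], [3, 2], [0, 0, 5]]): A returns ([2, 1, 0], 2), B returns ([2, 1, 0], 2)
import Mathlib
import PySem

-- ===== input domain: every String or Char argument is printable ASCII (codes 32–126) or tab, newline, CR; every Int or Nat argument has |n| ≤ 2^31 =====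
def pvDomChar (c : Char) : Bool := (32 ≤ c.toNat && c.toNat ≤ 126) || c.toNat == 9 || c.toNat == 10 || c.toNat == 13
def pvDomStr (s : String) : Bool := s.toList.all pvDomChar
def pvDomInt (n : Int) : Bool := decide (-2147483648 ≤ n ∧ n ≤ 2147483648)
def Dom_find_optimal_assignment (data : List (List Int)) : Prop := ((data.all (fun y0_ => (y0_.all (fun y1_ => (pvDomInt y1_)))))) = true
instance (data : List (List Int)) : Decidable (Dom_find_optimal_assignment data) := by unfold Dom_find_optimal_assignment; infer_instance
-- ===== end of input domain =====

-- B evaluates each swap by an O(1) cost delta instead of A's full cost recomputation (faster; return value only, A mutates no caller-visible state beyond its local list).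


-- ===== PORT A =====
-- data[i][assignment[i]]; indices produced by the programs are always nonnegative and (under Pre_) in range, so getD is exact there
def calculate_total_cost (assignment : List Int) (data : List (List Int)) : Int :=
  (List.range assignment.length).foldl
    (fun tc i => tc + (data.getD i []).getD (assignment.getD i 0).toNat 0) 0

-- assignment[i], assignment[j] = assignment[j], assignment[i]
def pvSwap (a : List Int) (i j : Nat) : List Int :=
  (a.set i (a.getD j 0)).set j (a.getD i 0)

def pvStepA (data : List (List Int)) (st : List Int × Int) (i j : Nat) : List Int × Int :=
  let a' := pvSwap st.1 i j
  let c := calculate_total_cost a' data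
  if c < st.2 then (a', c) else st

def find_optimal_assignment (data : List (List Int)) : List Int × Int :=
  let m := (data.headD []).length
  let a0 : List Int := (List.range m).map Int.ofNat
  (List.range m).foldl
    (fun st i => (List.range' (i + 1) (m - (i + 1))).foldl (fun st j => pvStepA data st i j) st)
    (a0, calculate_total_cost a0 data)

-- ===== PORT B =====
def pvG (data : List (List Int)) (i : Nat) (v : Int) : Int :=
  (data.getD i []).getD v.toNat 0

def pvStepB (data : List (List Int)) (st : List Int × Int) (i j : Nat) : List Int × Int :=
  let ai := st.1.getD i 0
  let aj := st.1.getD j 0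
  let delta := pvG data i aj + pvG data j ai - pvG data i ai - pvG data j aj
  if delta < 0 then ((st.1.set i aj).set j ai, st.2 + delta) else st

def find_optimal_assignment_alt (data : List (List Int)) : List Int × Int :=
  let m := (data.headD []).length
  let a0 : List Int := (List.range m).map Int.ofNat
  let c0 := ((List.range m).map (fun i => pvG data i (a0.getD i 0))).sum
  (List.range m).foldl
    (fun st i => (List.range' (i + 1) (m - (i + 1))).foldl (fun st j => pvStepB data st i j) st)
    (a0, c0)

-- ===== PRECONDITION & SPEC =====
-- Pre_ excludes empty/ragged inputs (no rows, fewer rows than len(data[0]), or one of the first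
-- len(data[0]) rows shorter than len(data[0])): on those Python A almost always raises IndexError,
-- and on the rare ragged inputs whose accesses happen to stay in range A still returns — B returns
-- the same value there too, the in-range condition just has no closed form.
def Pre_find_optimal_assignment (data : List (List Int)) : Prop :=
  data ≠ [] ∧ (data.headD []).length ≤ data.length ∧
    ∀ row ∈ data.take (data.headD []).length, (data.headD []).length ≤ row.length
instance (data : List (List Int)) : Decidable (Pre_find_optimal_assignment data) := by
  unfold Pre_find_optimal_assignment; infer_instance

def pvWitness_find_optimal_assignment : List (List Int) := [[4, 1], [2, 3]]

def Spec_find_optimal_assignment (data : List (List Int)) (out : List Int × Int) : Prop := out = find_optimal_assignment_alt data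
instance (data : List (List Int)) (out : List Int × Int) : Decidable (Spec_find_optimal_assignment data out) := by unfold Spec_find_optimal_assignment; infer_instance

-- ===== CLAIM (what is proved, stated in full; the proofs are below) =====
def Claim_equal_find_optimal_assignment : Prop := ∀ (data : List (List Int)), Dom_find_optimal_assignment data → Pre_find_optimal_assignment data → Spec_find_optimal_assignment data (find_optimal_assignment data)

-- ===== LEMMAS AND PROOFS =====

-- fold two functions that agree (and preserve an invariant) on the traversed elements
theorem pv_foldl_eq_inv {α β : Type} (P : α → Prop) (Q : β → Prop) (f g : α → β → α)
    (h : ∀ st x, P st → Q x → f st x = g st x ∧ P (f st x)) :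
    ∀ (l : List β) (init : α), P init → (∀ x ∈ l, Q x) →
      l.foldl f init = l.foldl g init ∧ P (l.foldl f init) := by
  intro l
  induction l with
  | nil => intro init hP _; exact ⟨rfl, hP⟩
  | cons x xs ih =>
    intro init hP hQ
    obtain ⟨heq, hP'⟩ := h init x hP (hQ x (by simp))
    have := ih (f init x) hP' (fun y hy => hQ y (by simp [hy]))
    simpa [heq] using this

theorem pv_cost_as_sum (assignment : List Int) (data : List (List Int)) :
    calculate_total_cost assignment data
      = ∑ i ∈ Finset.range assignment.length, pvG data i (assignment.getD i 0) := by
  unfold calculate_total_cost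
  rw [PySem.List.foldl_add]
  simp only [zero_add]
  rfl

theorem pv_swap_length (a : List Int) (i j : Nat) : (pvSwap a i j).length = a.length := by
  simp [pvSwap]

theorem pv_getD_set (a : List Int) (i j : Nat) (v : Int) (h : j < a.length) :
    (a.set i v).getD j 0 = if i = j then v else a.getD j 0 := by
  simp [List.getD_eq_getElem?_getD, List.getElem?_set]
  split <;> simp_all

theorem pv_swap_getD (a : List Int) (i j k : Nat) (hk : k < a.length) :
    (pvSwap a i j).getD k 0
      = if j = k then a.getD i 0 else if i = k then a.getD j 0 else a.getD k 0 := by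
  unfold pvSwap
  rw [pv_getD_set _ j k _ (by simpa using hk)]
  by_cases hjk : j = k
  · simp [hjk]
  · rw [if_neg hjk, if_neg hjk, pv_getD_set _ i k _ hk]

theorem pv_swap_cost (data : List (List Int)) (a : List Int) (i j : Nat)
    (hij : i < j) (hj : j < a.length) :
    calculate_total_cost (pvSwap a i j) data
      = calculate_total_cost a data
        + (pvG data i (a.getD j 0) + pvG data j (a.getD i 0)
            - pvG data i (a.getD i 0) - pvG data j (a.getD j 0)) := by
  have hi : i < a.length := lt_trans hij hj
  rw [pv_cost_as_sum, pv_cost_as_sum, pv_swap_length]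
  set F : Nat → Int := fun k => pvG data k (a.getD k 0) with hF
  set F' : Nat → Int := fun k => pvG data k ((pvSwap a i j).getD k 0) with hF'
  have key : ∑ k ∈ Finset.range a.length, (F' k - F k) = (F' i - F i) + (F' j - F j) := by
    apply Finset.sum_eq_add_of_mem i j (Finset.mem_range.mpr hi) (Finset.mem_range.mpr hj)
      (by omega)
    intro k hkmem hk2
    have hkl : k < a.length := Finset.mem_range.mp hkmem
    have heqk : (pvSwap a i j).getD k 0 = a.getD k 0 := by
      rw [pv_swap_getD a i j k hkl, if_neg (by omega), if_neg (by omega)]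
    simp only [hF, hF', heqk, sub_self]
  have hFi : F' i = pvG data i (a.getD j 0) := by
    rw [hF']
    simp only
    rw [pv_swap_getD a i j i hi, if_neg (by omega), if_pos rfl]
  have hFj : F' j = pvG data j (a.getD i 0) := by
    rw [hF']
    simp only
    rw [pv_swap_getD a i j j hj, if_pos rfl]
  have hsub := Finset.sum_sub_distrib (s := Finset.range a.length) F' F
  rw [hsub, hFi, hFj] at key
  linarith [key]

theorem pv_step_eq (data : List (List Int)) (m : Nat) (st : List Int × Int) (i j : Nat)
    (hP : st.2 = calculate_total_cost st.1 data ∧ st.1.length = m)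
    (hij : i < j) (hj : j < m) :
    pvStepA data st i j = pvStepB data st i j ∧
      ((pvStepA data st i j).2 = calculate_total_cost (pvStepA data st i j).1 data ∧
        (pvStepA data st i j).1.length = m) := by
  obtain ⟨hc, hlen⟩ := hP
  have hj' : j < st.1.length := by omega
  have hsw := pv_swap_cost data st.1 i j hij hj'
  simp only [pvStepA, pvStepB]
  set d : Int := pvG data i (st.1.getD j 0) + pvG data j (st.1.getD i 0)
      - pvG data i (st.1.getD i 0) - pvG data j (st.1.getD j 0) with hd
  rw [hsw, ← hc]
  by_cases hneg : d < 0
  · rw [if_pos (by omega), if_pos hneg]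
    refine ⟨rfl, ?_, ?_⟩
    · simp only
      rw [hsw, ← hc]
    · simpa [pv_swap_length] using hlen
  · rw [if_neg (by omega), if_neg hneg]
    exact ⟨rfl, hc, hlen⟩

-- ===== VERDICT (by name: the statement is the Claim_ definition above) =====
theorem find_optimal_assignment_spec : Claim_equal_find_optimal_assignment := by
  intro data _ _
  unfold Spec_find_optimal_assignment find_optimal_assignment find_optimal_assignment_alt
  simp only
  set m := (data.headD []).length with hm
  set a0 : List Int := (List.range m).map Int.ofNat with ha0
  have ha0len : a0.length = m := by simp [ha0]
  have hinit : ((List.range m).map (fun i => pvG data i (a0.getD i 0))).sum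
      = calculate_total_cost a0 data := by
    rw [pv_cost_as_sum, ha0len]; rfl
  rw [hinit]
  have main := pv_foldl_eq_inv
    (P := fun st : List Int × Int => st.2 = calculate_total_cost st.1 data ∧ st.1.length = m)
    (Q := fun i => i < m)
    (f := fun st i => (List.range' (i + 1) (m - (i + 1))).foldl (fun st j => pvStepA data st i j) st)
    (g := fun st i => (List.range' (i + 1) (m - (i + 1))).foldl (fun st j => pvStepB data st i j) st)
    (h := by
      intro st i hP hi
      exact pv_foldl_eq_inv
        (P := fun st : List Int × Int => st.2 = calculate_total_cost st.1 data ∧ st.1.length = m)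
        (Q := fun j => i < j ∧ j < m)
        (f := fun st j => pvStepA data st i j)
        (g := fun st j => pvStepB data st i j)
        (fun st j hPj hQj => pv_step_eq data m st i j hPj hQj.1 hQj.2)
        _ st hP
        (by
          intro j hjmem
          have := List.mem_range'_1.mp hjmem
          omega))
    (List.range m) (a0, calculate_total_cost a0 data)
    ⟨rfl, ha0len⟩
    (by intro x hx; exact List.mem_range.mp hx)
  exact main.1
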